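-- pv_equiv track=rewrite | github.com/daniel-reich/turbo-robot | 2C3gtb4treAFyWJMg_19.py | polybius
-- ===== SOURCE A (Python) =====
-- def polybius(text):
--   alp = "abcdefghiklmnopqrstuvwxyz"
--   num = "12345"
--   result = ""
--   is_num = bool(text.strip()[0] in num)
--
--   if is_num:
--     i = 0
--     while i < len(text):
--       if text[i] == " ":
--         result += " "
--         i += 1
--       else:
--         result += alp[(5*(int(text[i])-1))+int(text[i+1])-1]
--         i += 2
--   else:
--     text = text.lower()
--     text = text.replace("j","i")
--     for i in range(0,len(text)):
--       if text[i] == " ":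
--         result += " "
--       elif text[i] in alp:
--         result += str(int((alp.index(text[i])//5)+1)) + str(int((alp.index(text[i]) % 5) + 1))
--   return result
-- ===== SOURCE B (Python) =====
-- def polybius(text):
--     alp = "abcdefghiklmnopqrstuvwxyz"
--     if text.strip()[0] in "12345":
--         decoded = []
--         for w in text.split(" "):
--             letters = ""
--             for k in range(0, len(w), 2):
--                 d1 = int(w[k])
--                 d2 = int(w[k + 1])
--                 letters += alp[5 * (d1 - 1) + d2 - 1]
--             decoded.append(letters)
--         return " ".join(decoded)
--     t = text.lower().replace("j", "i")
--     encoded = []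
--     for w in t.split(" "):
--         code = ""
--         for c in w:
--             if c in alp:
--                 q, r = divmod(alp.index(c), 5)
--                 code += str(q + 1) + str(r + 1)
--         encoded.append(code)
--     return " ".join(encoded)
-- ===== Notes on version B (the rewrite author's own statement) =====
-- stated objective: alternative
-- what changed: A's single flat index-stepping loop with inline space handling (while i < len with i += 1 or 2, and a flat for over every character) is re-decomposed as split-on-spaces, process each word independently (two characters at a time for decode, per-character codes for encode), then join the word results with a single space; the encoder computes divmod(alp.index(c), 5) once per character where A runs alp.index twice.
import Mathlib
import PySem

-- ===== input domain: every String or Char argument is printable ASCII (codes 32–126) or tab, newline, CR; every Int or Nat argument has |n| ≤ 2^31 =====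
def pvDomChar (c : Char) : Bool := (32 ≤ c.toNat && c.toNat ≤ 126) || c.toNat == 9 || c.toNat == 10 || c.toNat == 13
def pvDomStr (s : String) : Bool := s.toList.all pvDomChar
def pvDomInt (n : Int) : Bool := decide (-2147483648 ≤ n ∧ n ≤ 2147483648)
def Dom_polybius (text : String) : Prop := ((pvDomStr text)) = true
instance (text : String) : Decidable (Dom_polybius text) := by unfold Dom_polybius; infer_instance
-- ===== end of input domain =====

-- B re-decomposes A's single flat index-stepping loop into split-on-spaces, process each word,
-- join the word results with " " (alternative decomposition; return value only, no mutation).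

-- ===== PORT A =====
-- alp = "abcdefghiklmnopqrstuvwxyz", num = "12345"
def polyAlpA : List Char :=
  ['a','b','c','d','e','f','g','h','i','k','l','m','n','o','p','q','r','s','t','u','v','w','x','y','z']
def polyNumA : List Char := ['1','2','3','4','5']

-- A's decode while-loop: i steps by 1 on a space, by 2 otherwise; transcribed as recursion on
-- the remaining characters.  Python raises where a PySem primitive yields none (the .getD
-- defaults and the [c] => [] arm are unreachable under Pre_).
def polyDecodeA : List Char → List Char
  | [] => []
  | c :: rest =>
    if c = ' ' then ' ' :: polyDecodeA rest
    else
      match rest with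
      | [] => []   -- Python: IndexError on text[i+1]; excluded by Pre_
      | c2 :: rest2 =>
        (PySem.List.pyGet? polyAlpA
            (5 * ((PySem.Int.ofChars? [c]).getD 0 - 1) + (PySem.Int.ofChars? [c2]).getD 0 - 1)).getD ' '
          :: polyDecodeA rest2

-- A's encode for-loop over range(0, len(text)) accumulating `result`
def polyEncodeA (cs : List Char) : List Char :=
  cs.foldl (fun acc c =>
    if c = ' ' then acc ++ [' ']
    else if polyAlpA.contains c then
      let k : Int := ((PySem.List.index? polyAlpA c).getD 0 : Nat)
      acc ++ (PySem.Int.toStr (PySem.Int.floordiv k 5 + 1)).toList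
          ++ (PySem.Int.toStr (PySem.Int.mod k 5 + 1)).toList
    else acc) []

def polybius (text : String) : String :=
  let cs := text.toList
  -- is_num = bool(text.strip()[0] in num); text.strip()[0] raises IndexError on blank input (excluded by Pre_)
  let first := (PySem.List.pyGet? (PySem.Chars.strip cs) 0).getD ' '
  if PySem.Chars.isIn [first] polyNumA then
    String.mk (polyDecodeA cs)
  else
    String.mk (polyEncodeA (PySem.Chars.replace (PySem.Chars.lower cs) ['j'] ['i']))

-- ===== PORT B =====
def polyAlpB : List Char :=
  ['a','b','c','d','e','f','g','h','i','k','l','m','n','o','p','q','r','s','t','u','v','w','x','y','z']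

-- Source B: for k in range(0, len(w), 2): letters += alp[5*(d1-1)+d2-1]; transcribed as recursion
-- taking two characters per step (an odd-length word makes Python raise IndexError on w[k+1],
-- excluded by Pre_).
def polyDecWordB : List Char → List Char
  | c1 :: c2 :: rest =>
    (PySem.List.pyGet? polyAlpB
        (5 * ((PySem.Int.ofChars? [c1]).getD 0 - 1) + (PySem.Int.ofChars? [c2]).getD 0 - 1)).getD ' '
      :: polyDecWordB rest
  | _ => []

-- Source B: if c in alp: q, r = divmod(alp.index(c), 5); code += str(q+1) + str(r+1)
def polyEncCharB (c : Char) : List Char :=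
  if polyAlpB.contains c then
    let k : Int := ((PySem.List.index? polyAlpB c).getD 0 : Nat)
    match PySem.Int.divmod? k 5 with
    | some (q, r) => (PySem.Int.toStr (q + 1)).toList ++ (PySem.Int.toStr (r + 1)).toList
    | none => []   -- unreachable: the divisor is the literal 5
  else []

def polybius_alt (text : String) : String :=
  let cs := text.toList
  let first := (PySem.List.pyGet? (PySem.Chars.strip cs) 0).getD ' '
  if PySem.Chars.isIn [first] ['1','2','3','4','5'] then
    -- " ".join of the per-word decodings of text.split(" ")
    String.mk (PySem.Chars.join [' '] ((List.splitOn ' ' cs).map polyDecWordB))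
  else
    let t := PySem.Chars.replace (PySem.Chars.lower cs) ['j'] ['i']
    String.mk (PySem.Chars.join [' ']
      ((List.splitOn ' ' t).map (fun w => w.foldl (fun code c => code ++ polyEncCharB c) [])))

-- ===== PRECONDITION & SPEC =====
-- A decode-mode word is processable by Python's A iff it has even length, only digit
-- characters (codes 48–57; else int() raises ValueError, an odd word IndexError) and every
-- digit pair (d1,d2) satisfies 5*d1+d2 ≤ 30, i.e. the index 5*(d1-1)+d2-1 stays below 25
-- (else alp[...] raises IndexError; indices as low as -6 index from the end and return).
def polyWordOk (w : List Char) : Bool :=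
  w.length % 2 == 0 && w.all (fun c => 48 ≤ c.toNat && c.toNat ≤ 57) &&
  (List.range (w.length / 2)).all (fun k =>
    5 * ((w.getD (2 * k) '0').toNat - 48) + ((w.getD (2 * k + 1) '0').toNat - 48) ≤ 30)

-- Pre_ is exactly where the Python A returns: a non-blank input, and — when the first
-- stripped character selects decode mode — every space-separated word is processable.
def Pre_polybius (text : String) : Prop :=
  PySem.Chars.strip text.toList ≠ [] ∧
  (PySem.Chars.isIn [(PySem.List.pyGet? (PySem.Chars.strip text.toList) 0).getD ' ']
      ['1','2','3','4','5'] = true →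
    (List.splitOn ' ' text.toList).all polyWordOk = true)
instance (text : String) : Decidable (Pre_polybius text) := by unfold Pre_polybius; infer_instance

def pvWitness_polybius : String := "23 1545 31"

def Spec_polybius (text : String) (out : String) : Prop := out = polybius_alt text
instance (text : String) (out : String) : Decidable (Spec_polybius text out) := by unfold Spec_polybius; infer_instance

-- ===== CLAIM (what is proved, stated in full; the proofs are below) =====
def Claim_equal_polybius : Prop := ∀ (text : String), Dom_polybius text → Pre_polybius text → Spec_polybius text (polybius text)

-- ===== LEMMAS AND PROOFS =====

-- join over a head word with a prefix chunk peeled off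
theorem polyJoin_head (s x a : List Char) (l : List (List Char)) :
    PySem.Chars.join s ((x ++ a) :: l) = x ++ PySem.Chars.join s (a :: l) := by
  cases l with
  | nil => simp [PySem.Chars.join_singleton]
  | cons b l => simp [PySem.Chars.join_cons_cons]

theorem polySplit_space (cs : List Char) :
    List.splitOn ' ' (' ' :: cs) = [] :: List.splitOn ' ' cs := by
  simp [List.splitOn, List.splitOnP_cons]

theorem polySplit_char (c : Char) (cs : List Char) (hc : c ≠ ' ') :
    List.splitOn ' ' (c :: cs) = (List.splitOn ' ' cs).modifyHead (c :: ·) := by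
  simp [List.splitOn, List.splitOnP_cons, hc]

theorem polySplit_ne_nil (cs : List Char) : List.splitOn ' ' cs ≠ [] :=
  List.splitOnP_ne_nil _ cs

-- ===== decode side: A's flat pair loop = per-word pair loops joined by " " =====
theorem polyDec_eq (cs : List Char)
    (h : ∀ w ∈ List.splitOn ' ' cs, w.length % 2 = 0) :
    polyDecodeA cs = PySem.Chars.join [' '] ((List.splitOn ' ' cs).map polyDecWordB) := by
  induction cs using polyDecodeA.induct with
  | case1 => simp [polyDecodeA, List.splitOn, PySem.Chars.join_singleton, polyDecWordB]
  | case2 rest ih =>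
    obtain ⟨w, tl, hw⟩ := List.exists_cons_of_ne_nil (polySplit_ne_nil rest)
    have h' : ∀ u ∈ List.splitOn ' ' rest, u.length % 2 = 0 := by
      intro u hu; exact h u (by rw [polySplit_space]; exact List.mem_cons_of_mem _ hu)
    rw [polySplit_space, hw, List.map_cons, List.map_cons]
    rw [show polyDecWordB [] = [] from rfl, PySem.Chars.join_cons_cons]
    simp only [List.nil_append, List.singleton_append]
    rw [← List.map_cons, ← hw, ← ih h']
    rw [polyDecodeA.eq_def]; simp
  | case3 c hc =>
    exfalso
    have := h [c] (by rw [polySplit_char c _ hc, List.splitOn_nil]; simp)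
    simp at this
  | case4 c hc c2 rest2 ih =>
    have hc2 : c2 ≠ ' ' := by
      intro he
      subst he
      have := h [c] (by rw [polySplit_char c _ hc, polySplit_space]; simp)
      simp at this
    obtain ⟨w2, tl2, hw2⟩ := List.exists_cons_of_ne_nil (polySplit_ne_nil rest2)
    have hsplit : List.splitOn ' ' (c :: c2 :: rest2) = (c :: c2 :: w2) :: tl2 := by
      rw [polySplit_char c _ hc, polySplit_char c2 _ hc2, hw2]; rfl
    have h' : ∀ u ∈ List.splitOn ' ' rest2, u.length % 2 = 0 := by
      intro u hu
      rw [hw2] at hu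
      rcases List.mem_cons.mp hu with rfl | hu
      · have := h (c :: c2 :: u) (by rw [hsplit]; exact List.mem_cons_self)
        simp at this; omega
      · exact h u (by rw [hsplit]; exact List.mem_cons_of_mem _ hu)
    rw [hsplit, List.map_cons]
    rw [show polyDecWordB (c :: c2 :: w2) =
          (PySem.List.pyGet? polyAlpB
            (5 * ((PySem.Int.ofChars? [c]).getD 0 - 1) + (PySem.Int.ofChars? [c2]).getD 0 - 1)).getD ' '
          :: polyDecWordB w2 from rfl]
    rw [show ((PySem.List.pyGet? polyAlpB
            (5 * ((PySem.Int.ofChars? [c]).getD 0 - 1) + (PySem.Int.ofChars? [c2]).getD 0 - 1)).getD ' '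
          :: polyDecWordB w2) = [(PySem.List.pyGet? polyAlpB
            (5 * ((PySem.Int.ofChars? [c]).getD 0 - 1) + (PySem.Int.ofChars? [c2]).getD 0 - 1)).getD ' ']
          ++ polyDecWordB w2 from rfl, polyJoin_head]
    rw [← List.map_cons, ← hw2, ← ih h']
    rw [polyDecodeA.eq_def]; simp [hc, polyAlpA, polyAlpB]

-- ===== encode side: A's flat per-character loop = per-word loops joined by " " =====
-- what A's loop body appends for one character
def polyEncStepA (c : Char) : List Char :=
  if c = ' ' then [' ']
  else if polyAlpA.contains c then
    let k : Int := ((PySem.List.index? polyAlpA c).getD 0 : Nat)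
    (PySem.Int.toStr (PySem.Int.floordiv k 5 + 1)).toList
      ++ (PySem.Int.toStr (PySem.Int.mod k 5 + 1)).toList
  else []

theorem polyEncodeA_flatMap' (cs : List Char) (acc : List Char) :
    cs.foldl (fun acc c =>
      if c = ' ' then acc ++ [' ']
      else if polyAlpA.contains c then
        let k : Int := ((PySem.List.index? polyAlpA c).getD 0 : Nat)
        acc ++ (PySem.Int.toStr (PySem.Int.floordiv k 5 + 1)).toList
            ++ (PySem.Int.toStr (PySem.Int.mod k 5 + 1)).toList
      else acc) acc = acc ++ cs.flatMap polyEncStepA := by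
  induction cs generalizing acc with
  | nil => simp
  | cons c rest ih =>
    simp only [List.foldl_cons, List.flatMap_cons, ih]
    by_cases hc : c = ' '
    · simp [hc, polyEncStepA]
    · by_cases hm : c ∈ polyAlpA
      · simp [hc, hm, polyEncStepA]
      · simp [hc, hm, polyEncStepA]

theorem polyEncodeA_flatMap (cs : List Char) : polyEncodeA cs = cs.flatMap polyEncStepA :=
  polyEncodeA_flatMap' cs []

theorem polyEncB_word (w : List Char) (acc : List Char) :
    w.foldl (fun code c => code ++ polyEncCharB c) acc = acc ++ w.flatMap polyEncCharB := by
  induction w generalizing acc with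
  | nil => simp
  | cons c rest ih => simp [ih]

theorem polyEncStep_eq (c : Char) (hc : c ≠ ' ') : polyEncStepA c = polyEncCharB c := by
  simp only [polyEncStepA, polyEncCharB, if_neg hc]
  by_cases hm : c ∈ polyAlpA
  · rw [if_pos (by simpa using hm), if_pos (by simpa [polyAlpA, polyAlpB] using hm)]
    simp [PySem.Int.divmod?, PySem.Int.floordiv, PySem.Int.mod, polyAlpA, polyAlpB]
  · rw [if_neg (by simpa using hm), if_neg (by simpa [polyAlpA, polyAlpB] using hm)]

theorem polyEnc_eq (cs : List Char) :
    cs.flatMap polyEncStepA =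
      PySem.Chars.join [' '] ((List.splitOn ' ' cs).map (fun w => w.flatMap polyEncCharB)) := by
  induction cs with
  | nil => simp [List.splitOn, PySem.Chars.join_singleton]
  | cons c rest ih =>
    by_cases hc : c = ' '
    · subst hc
      obtain ⟨w, tl, hw⟩ := List.exists_cons_of_ne_nil (polySplit_ne_nil rest)
      rw [polySplit_space, hw, List.map_cons, List.map_cons]
      simp only [List.flatMap_nil]
      rw [PySem.Chars.join_cons_cons]
      simp only [List.nil_append, List.singleton_append]
      rw [← List.map_cons, ← hw, ← ih]
      simp [polyEncStepA]
    · obtain ⟨w, tl, hw⟩ := List.exists_cons_of_ne_nil (polySplit_ne_nil rest)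
      rw [polySplit_char c _ hc, hw, List.modifyHead, List.map_cons]
      simp only [List.flatMap_cons]
      rw [polyJoin_head, ← List.map_cons, ← hw, ← ih, polyEncStep_eq c hc]

-- ===== VERDICT (by name: the statement is the Claim_ definition above) =====
theorem polybius_spec : Claim_equal_polybius := by
  intro text _hdom hpre
  unfold Spec_polybius polybius polybius_alt
  simp only [polyNumA]
  by_cases hnum : PySem.Chars.isIn
      [(PySem.List.pyGet? (PySem.Chars.strip text.toList) 0).getD ' '] ['1','2','3','4','5'] = true
  · rw [if_pos hnum, if_pos hnum]
    congr 1
    apply polyDec_eq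
    intro w hw
    have hall := hpre.2 hnum
    rw [List.all_eq_true] at hall
    have := hall w hw
    unfold polyWordOk at this
    simp only [Bool.and_eq_true, beq_iff_eq] at this
    exact this.1.1
  · rw [if_neg hnum, if_neg hnum]
    congr 1
    rw [polyEncodeA_flatMap, polyEnc_eq]
    congr 1
    apply List.map_congr_left
    intro w _
    rw [polyEncB_word]
    simp
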